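-- pv_equiv track=rewrite | github.com/AlexNedelcu24/UBB-4th-Semester | Artificial Intelligence/lab1/pb1.py | ultim
-- ===== SOURCE A (Python) =====
-- def ultim(a):
--
--     a = a.lower()
--     b = a.split(" ")
--
--     cuv = b[0]
--
--
--     for x in b:
--         if cuv < x:
--             cuv = x
--
--     return cuv
-- ===== SOURCE B (Python) =====
-- def ultim(a):
--     words = a.lower().split(" ")
--     return sorted(words)[-1]
-- ===== Notes on version B (the rewrite author's own statement) =====
-- stated objective: simpler
-- what changed: Replaces the explicit running-maximum loop with sorting the word list and taking its last element.
import Mathlib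
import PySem

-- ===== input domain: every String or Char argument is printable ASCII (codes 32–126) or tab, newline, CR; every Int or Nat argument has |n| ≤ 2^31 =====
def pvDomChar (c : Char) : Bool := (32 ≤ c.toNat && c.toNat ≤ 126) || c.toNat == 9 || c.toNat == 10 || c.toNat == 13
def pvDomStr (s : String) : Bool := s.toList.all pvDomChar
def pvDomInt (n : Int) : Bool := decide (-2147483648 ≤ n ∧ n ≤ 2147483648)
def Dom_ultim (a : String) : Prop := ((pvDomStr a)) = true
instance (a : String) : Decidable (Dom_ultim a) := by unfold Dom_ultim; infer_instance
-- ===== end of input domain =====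

-- B replaces A's running-maximum loop with sorting the word list and taking its last element.

-- ===== PORT A =====
-- s.split(" ") is never empty, so the default of pyGetD below is unreachable.
def ultim (a : String) : String :=
  -- split? returns none only for an empty separator; " " is nonempty, so getD [] is unreachable
  let b := (PySem.Str.split? (PySem.Str.lower a) " ").getD []
  let cuv := PySem.List.pyGetD b 0 ""
  b.foldl (fun cuv x => if cuv < x then x else cuv) cuv

-- ===== PORT B =====
-- sorted(words)[-1]; the word list is never empty, so the default is unreachable.
def ultim_alt (a : String) : String :=
  let words := (PySem.Str.split? (PySem.Str.lower a) " ").getD []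
  PySem.List.pyGetD (PySem.List.sorted words (fun x => x) false) (-1) ""

-- ===== PRECONDITION & SPEC =====
def Spec_ultim (a : String) (out : String) : Prop := out = ultim_alt a
instance (a : String) (out : String) : Decidable (Spec_ultim a out) := by unfold Spec_ultim; infer_instance

-- ===== CLAIM (what is proved, stated in full; the proofs are below) =====
def Claim_equal_ultim : Prop := ∀ (a : String), Dom_ultim a → Spec_ultim a (ultim a)

-- ===== LEMMAS AND PROOFS =====

theorem fold_max_bound (xs : List String) (init : String) :
    init ≤ xs.foldl (fun c x => if c < x then x else c) init ∧
    ∀ y ∈ xs, y ≤ xs.foldl (fun c x => if c < x then x else c) init := by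
  induction xs generalizing init with
  | nil => simp
  | cons h t ih =>
    simp only [List.foldl_cons]
    rcases ih (if init < h then h else init) with ⟨h1, h2⟩
    refine ⟨le_trans ?_ h1, ?_⟩
    · split_ifs with hlt
      · exact le_of_lt hlt
      · exact le_refl _
    · intro y hy
      rcases List.mem_cons.mp hy with rfl | hy
      · refine le_trans ?_ h1
        split_ifs with hlt
        · exact le_refl _
        · exact le_of_not_gt hlt
      · exact h2 y hy

theorem fold_max_mem (xs : List String) (init : String) :
    xs.foldl (fun c x => if c < x then x else c) init = init ∨
    xs.foldl (fun c x => if c < x then x else c) init ∈ xs := by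
  induction xs generalizing init with
  | nil => simp
  | cons h t ih =>
    simp only [List.foldl_cons]
    rcases ih (if init < h then h else init) with heq | hmem
    · rw [heq]
      split_ifs with hlt
      · right; exact List.mem_cons_self
      · left; rfl
    · right; exact List.mem_cons_of_mem _ hmem

theorem pairwise_le_getLast : ∀ (l : List String) (hl : l ≠ []),
    l.Pairwise (· ≤ ·) → ∀ y ∈ l, y ≤ l.getLast hl
  | [h], _, _, y, hy => by
      simp at hy
      simp [hy, List.getLast]
  | h :: h' :: t, hl, hp, y, hy => by
      have htne : (h' :: t) ≠ ([] : List String) := by simp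
      have hlast : (h :: h' :: t).getLast hl = (h' :: t).getLast htne := rfl
      rw [hlast]
      rw [List.pairwise_cons] at hp
      rcases List.mem_cons.mp hy with rfl | hy
      · exact hp.1 _ (List.getLast_mem htne)
      · exact pairwise_le_getLast (h' :: t) htne hp.2 y hy

theorem ultim_eq (xs : List String) :
    PySem.List.pyGetD (PySem.List.sorted xs (fun x => x) false) (-1) "" =
    xs.foldl (fun c x => if c < x then x else c) (PySem.List.pyGetD xs 0 "") := by
  cases xs with
  | nil => decide
  | cons h t =>
    have hperm := PySem.List.sorted_perm (h :: t) (fun x => x) false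
    have hsne : PySem.List.sorted (h :: t) (fun x => x) false ≠ [] := by
      intro hnil
      have := hperm.length_eq
      simp [hnil] at this
    rw [PySem.List.pyGetD_neg_one _ _ hsne]
    have hinit : PySem.List.pyGetD (h :: t) 0 "" = h := by
      simp [PySem.List.pyGetD_zero_cons]
    rw [hinit]
    -- the fold result
    set m1 := (h :: t).foldl (fun c x => if c < x then x else c) h with hm1
    set m2 := (PySem.List.sorted (h :: t) (fun x => x) false).getLast hsne with hm2
    have hpair : (PySem.List.sorted (h :: t) (fun x => x) false).Pairwise (· ≤ ·) := by
      have := PySem.List.sorted_pairwise (h :: t) (fun x => x)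
      simpa using this
    have hm2mem : m2 ∈ h :: t := hperm.mem_iff.mp (List.getLast_mem hsne)
    have hm2ub : ∀ y ∈ h :: t, y ≤ m2 := by
      intro y hy
      exact pairwise_le_getLast _ hsne hpair y (hperm.mem_iff.mpr hy)
    have hm1mem : m1 ∈ h :: t := by
      rcases fold_max_mem (h :: t) h with heq | hmem
      · rw [hm1, heq]; exact List.mem_cons_self
      · exact hmem
    have hm1ub : ∀ y ∈ h :: t, y ≤ m1 := (fold_max_bound (h :: t) h).2
    exact le_antisymm (hm1ub m2 hm2mem) (hm2ub m1 hm1mem)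

-- ===== VERDICT (by name: the statement is the Claim_ definition above) =====
theorem ultim_spec : Claim_equal_ultim := by
  intro a _
  unfold Spec_ultim ultim ultim_alt
  exact (ultim_eq ((PySem.Str.split? (PySem.Str.lower a) " ").getD [])).symm
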